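-- pv_equiv track=rewrite | github.com/bcgov/onRouteBCSpecification | extract_pdf_data.py | _expand_merged
-- ===== SOURCE A (Python) =====
-- def _expand_merged(cells: list) -> list[str]:
--     """
--     Forward-fill None / blank cells to replicate merged-cell values
--     (e.g. 'Tridem Drive' spanning axles 2-4 → ['Tridem Drive', 'Tridem Drive', 'Tridem Drive']).
--     """
--     result = []
--     last = ''
--     for c in cells:
--         val = str(c).strip() if c is not None else ''
--         if val:
--             last = val
--         result.append(last)
--     return result
-- ===== SOURCE B (Python) =====
-- def _expand_merged(cells: list) -> list[str]:
--     """Forward-fill by emitting runs: find the non-blank positions, then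
--     repeat each carried value over the gap up to the next one."""
--     vals = ['' if c is None else str(c).strip() for c in cells]
--     out = []
--     prev, cur = 0, ''
--     for i, v in [(i, v) for i, v in enumerate(vals) if v]:
--         out.extend([cur] * (i - prev))
--         prev, cur = i, v
--     out.extend([cur] * (len(vals) - prev))
--     return out
-- ===== Notes on version B (the rewrite author's own statement) =====
-- stated objective: alternative
-- what changed: B replaces A's single stateful carry loop by a normalization pass plus a run-encoding pass: it collects the non-blank positions/values and emits each carried value as a repeated run over the gap to the next non-blank cell.
import Mathlib
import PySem

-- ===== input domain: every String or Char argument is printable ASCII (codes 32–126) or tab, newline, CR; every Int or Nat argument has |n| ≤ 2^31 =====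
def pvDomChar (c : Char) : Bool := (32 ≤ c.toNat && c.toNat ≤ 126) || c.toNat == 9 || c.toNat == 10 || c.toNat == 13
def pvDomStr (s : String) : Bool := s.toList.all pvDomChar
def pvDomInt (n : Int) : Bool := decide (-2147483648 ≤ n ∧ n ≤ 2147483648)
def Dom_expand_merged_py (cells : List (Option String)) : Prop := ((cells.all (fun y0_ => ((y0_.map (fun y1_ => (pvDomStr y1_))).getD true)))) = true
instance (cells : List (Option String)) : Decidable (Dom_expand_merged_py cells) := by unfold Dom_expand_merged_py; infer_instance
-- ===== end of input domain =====

-- B re-implements A's stateful forward-fill loop as a normalization pass plus a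
-- run-encoding pass over the non-blank positions; same values, no speed claim.

-- ===== PORT A =====
-- val = str(c).strip() if c is not None else ''   (shared by both Pythons verbatim)
def pvNorm (c : Option String) : String :=
  match c with
  | none => ""
  | some s => PySem.Str.strip s

def expand_merged_py (cells : List (Option String)) : List String :=
  (cells.foldl (fun (st : List String × String) c =>
      let val := pvNorm c
      let last := if val ≠ "" then val else st.2
      (st.1 ++ [last], last)) (([] : List String), "")).1

-- ===== PORT B =====
-- loop body: out.extend([cur] * (i - prev)); prev, cur = i, v
def pvStepB (st : List String × Int × String) (q : Int × String) : List String × Int × String :=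
  (st.1 ++ List.replicate (q.1 - st.2.1).toNat st.2.2, q.1, q.2)

def expand_merged_py_alt (cells : List (Option String)) : List String :=
  let vals := cells.map pvNorm
  let st := ((PySem.List.enumerate vals 0).filter (fun q => q.2 ≠ "")).foldl pvStepB
      (([] : List String), 0, "")
  st.1 ++ List.replicate ((vals.length : Int) - st.2.1).toNat st.2.2

-- ===== PRECONDITION & SPEC =====
def Spec_expand_merged_py (cells : List (Option String)) (out : List String) : Prop := out = expand_merged_py_alt cells
instance (cells : List (Option String)) (out : List String) : Decidable (Spec_expand_merged_py cells out) := by unfold Spec_expand_merged_py; infer_instance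

-- ===== CLAIM (what is proved, stated in full; the proofs are below) =====
def Claim_equal_expand_merged_py : Prop := ∀ (cells : List (Option String)), Dom_expand_merged_py cells → Spec_expand_merged_py cells (expand_merged_py cells)

-- ===== LEMMAS AND PROOFS =====

/-- Reference forward-fill on the normalized values. -/
def pvFF (last : String) : List String → List String
  | [] => []
  | v :: vs => let l := if v ≠ "" then v else last; l :: pvFF l vs

theorem pvFoldA (cells : List (Option String)) :
    ∀ (acc : List String) (last : String),
    (cells.foldl (fun (st : List String × String) c =>
        let val := pvNorm c
        let last := if val ≠ "" then val else st.2
        (st.1 ++ [last], last)) (acc, last)).1 = acc ++ pvFF last (cells.map pvNorm) := by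
  induction cells with
  | nil => intro acc last; simp [pvFF]
  | cons c cs ih =>
      intro acc last
      simp only [List.foldl_cons, List.map_cons, pvFF]
      rw [ih]
      simp

theorem pvFoldB (vs : List String) :
    ∀ (s p : Int) (cur : String) (out : List String), p ≤ s →
    (let st := ((PySem.List.enumerate vs s).filter (fun q => q.2 ≠ "")).foldl pvStepB (out, p, cur)
     st.1 ++ List.replicate ((s + (vs.length : Int)) - st.2.1).toNat st.2.2)
    = out ++ List.replicate (s - p).toNat cur ++ pvFF cur vs := by
  induction vs with
  | nil =>
      intro s p cur out hps
      simp [PySem.List.enumerate_nil, pvFF]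
  | cons v vs ih =>
      intro s p cur out hps
      rw [PySem.List.enumerate_cons]
      simp only [List.length_cons, Nat.cast_add, Nat.cast_one]
      have hc : s + ((vs.length : Int) + 1) = (s + 1) + (vs.length : Int) := by ring
      rw [hc]
      by_cases hv : v = ""
      · subst hv
        rw [List.filter_cons_of_neg (by simp)]
        have hIH := ih (s + 1) p cur out (by omega)
        simp only at hIH
        rw [hIH]
        have hrep : ((s + 1 - p).toNat) = (s - p).toNat + 1 := by omega
        rw [hrep, List.replicate_succ']
        simp [pvFF, List.append_assoc]
      · rw [List.filter_cons_of_pos (by simp [hv])]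
        rw [List.foldl_cons]
        have hstep : pvStepB (out, p, cur) (s, v)
            = (out ++ List.replicate (s - p).toNat cur, s, v) := by
          simp [pvStepB]
        rw [hstep]
        have hIH := ih (s + 1) s v (out ++ List.replicate (s - p).toNat cur) (by omega)
        simp only at hIH
        rw [hIH]
        have hrep : ((s + 1 - s).toNat) = 1 := by omega
        rw [hrep]
        simp [pvFF, hv, List.append_assoc, List.replicate]

-- ===== VERDICT (by name: the statement is the Claim_ definition above) =====
theorem expand_merged_py_spec : Claim_equal_expand_merged_py := by
  intro cells _
  unfold Spec_expand_merged_py expand_merged_py expand_merged_py_alt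
  rw [pvFoldA]
  have hB := pvFoldB (cells.map pvNorm) 0 0 "" [] (le_refl 0)
  simp only [zero_add] at hB ⊢
  rw [hB]
  simp
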